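-- pv_equiv track=rewrite | github.com/MrDragon77/Python_elective_discipline | HomeWork_4/Part_1/module1.py | vector_filter
-- ===== SOURCE A (Python) =====
-- def vector_filter(vector, filter):
--     """
--     Фильтрация вектора ядерным фильтром.
--     vector: Вектор N
--     filter: Вектор K
--
--     result - Отфильтрованный веткор
--     """
--     n = len(vector)
--     k = len(filter)
--
--     result = []
--
--     for i in range(n - k + 1):
--         acc = 0
--         for j in range(k):
--             acc += vector[i + j] * filter[j]
--         result.append(acc)
--
--     return result
-- ===== SOURCE B (Python) =====
-- def vector_filter(vector, filter):
--     n = len(vector)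
--     k = len(filter)
--     m = n - k + 1
--     result = [0] * m
--     for j in range(k):
--         fj = filter[j]
--         result = [result[i] + vector[i + j] * fj for i in range(m)]
--     return result
-- ===== Notes on version B (the rewrite author's own statement) =====
-- stated objective: alternative
-- what changed: Replaces A's gather (outer loop over outputs, inner dot-product accumulator) by a scatter convolution: pre-allocate the m = n-k+1 zero outputs and loop over kernel positions j, adding vector[i+j]*filter[j] into every output at once.
import Mathlib
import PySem

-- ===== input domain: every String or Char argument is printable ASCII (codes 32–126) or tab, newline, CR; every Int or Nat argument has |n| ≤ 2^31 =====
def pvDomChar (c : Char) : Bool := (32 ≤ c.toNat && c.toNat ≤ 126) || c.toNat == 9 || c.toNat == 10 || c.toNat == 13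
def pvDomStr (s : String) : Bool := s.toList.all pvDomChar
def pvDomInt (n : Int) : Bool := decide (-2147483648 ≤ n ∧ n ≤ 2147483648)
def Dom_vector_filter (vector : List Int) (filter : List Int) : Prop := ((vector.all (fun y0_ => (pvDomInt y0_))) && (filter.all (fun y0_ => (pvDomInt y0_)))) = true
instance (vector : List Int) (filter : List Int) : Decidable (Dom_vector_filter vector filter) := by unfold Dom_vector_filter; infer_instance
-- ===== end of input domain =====

-- B replaces A's gather (outer loop over outputs, inner dot-product accumulator) by a
-- scatter convolution (pre-allocated zero outputs, outer loop over kernel positions);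
-- same O(n*k) cost, alternative decomposition.

-- ===== PORT A =====
def vector_filter (vector : List Int) (filter : List Int) : List Int :=
  let n : Int := vector.length
  let k : Int := filter.length
  (PySem.List.pyRange 0 (n - k + 1) 1).foldl
    (fun result i =>
      result ++ [(PySem.List.pyRange 0 k 1).foldl
        (fun acc j => acc + PySem.List.pyGetD vector (i + j) 0 * PySem.List.pyGetD filter j 0) 0])
    []

-- ===== PORT B =====
def vector_filter_alt (vector : List Int) (filter : List Int) : List Int :=
  let n : Int := vector.length
  let k : Int := filter.length
  let m : Int := n - k + 1
  (PySem.List.pyRange 0 k 1).foldl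
    (fun result j =>
      let fj := PySem.List.pyGetD filter j 0
      (PySem.List.pyRange 0 m 1).map
        (fun i => PySem.List.pyGetD result i 0 + PySem.List.pyGetD vector (i + j) 0 * fj))
    (List.replicate m.toNat 0)

-- ===== PRECONDITION & SPEC =====
def Spec_vector_filter (vector : List Int) (filter : List Int) (out : List Int) : Prop := out = vector_filter_alt vector filter
instance (vector : List Int) (filter : List Int) (out : List Int) : Decidable (Spec_vector_filter vector filter out) := by unfold Spec_vector_filter; infer_instance

-- ===== CLAIM (what is proved, stated in full; the proofs are below) =====
def Claim_equal_vector_filter : Prop := ∀ (vector : List Int) (filter : List Int), Dom_vector_filter vector filter → Spec_vector_filter vector filter (vector_filter vector filter)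

-- ===== LEMMAS AND PROOFS =====

-- dot product of vector[i..] with filter[0..t)
def pvInner (vector filter : List Int) (t : Int) (i : Int) : Int :=
  (PySem.List.pyRange 0 t 1).foldl
    (fun acc j => acc + PySem.List.pyGetD vector (i + j) 0 * PySem.List.pyGetD filter j 0) 0

lemma pvInner_succ (vector filter : List Int) (t : Nat) (i : Int) :
    pvInner vector filter ((t : Int) + 1) i
      = pvInner vector filter t i + PySem.List.pyGetD vector (i + t) 0 * PySem.List.pyGetD filter t 0 := by
  unfold pvInner
  rw [PySem.List.pyRange_one_succ_right (by exact_mod_cast Int.natCast_nonneg t)]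
  simp [List.foldl_append]

lemma pvScatter (vector filter : List Int) (m : Int) (t : Nat) :
    (PySem.List.pyRange 0 (t : Int) 1).foldl
      (fun result j =>
        let fj := PySem.List.pyGetD filter j 0
        (PySem.List.pyRange 0 m 1).map
          (fun i => PySem.List.pyGetD result i 0 + PySem.List.pyGetD vector (i + j) 0 * fj))
      ((PySem.List.pyRange 0 m 1).map (fun i => pvInner vector filter 0 i))
    = (PySem.List.pyRange 0 m 1).map (fun i => pvInner vector filter t i) := by
  induction t with
  | zero => simp
  | succ t ih =>
    rw [show ((t + 1 : Nat) : Int) = (t : Int) + 1 by push_cast; ring,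
        PySem.List.pyRange_one_succ_right (by exact_mod_cast Int.natCast_nonneg t),
        List.foldl_append, ih]
    simp only [List.foldl_cons, List.foldl_nil]
    refine List.map_congr_left (fun i hi => ?_)
    rw [PySem.List.pyGetD_map_pyRange_of_nonneg _ _ _ _ ((PySem.List.mem_pyRange_one.mp hi).1)
        ((PySem.List.mem_pyRange_one.mp hi).2), pvInner_succ]

-- ===== VERDICT (by name: the statement is the Claim_ definition above) =====
theorem vector_filter_spec : Claim_equal_vector_filter := by
  intro vector filter _
  unfold Spec_vector_filter vector_filter vector_filter_alt
  simp only []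
  rw [PySem.List.foldl_append_singleton_eq_map, List.nil_append,
      show List.replicate ((vector.length : Int) - filter.length + 1).toNat (0 : Int)
          = (PySem.List.pyRange 0 ((vector.length : Int) - filter.length + 1) 1).map
              (fun i => pvInner vector filter 0 i) from by
        simp [pvInner, List.map_const', PySem.List.length_pyRange_one],
      pvScatter vector filter ((vector.length : Int) - filter.length + 1) filter.length]
  rfl
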